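-- pv_equiv track=rewrite | github.com/sweedy12/newRethinkingMuse | ClusterWithNLI.py | pairs_dict_to_entailment_dicts
-- ===== SOURCE A (Python) =====
-- def pairs_dict_to_entailment_dicts(pairs_dict):
--     #finding all texts that entail a text:
--     text_to_entailers = {}
--     text_to_entailments = {}
--     for pair in pairs_dict:
--         if pairs_dict[pair] == "entailment" and pair[0] != pair[1]:
--             text1, text2 = pair
--             if text2 not in text_to_entailers:
--                 text_to_entailers[text2] = set()
--             text_to_entailers[text2].add(text1)
--             if text1 not in text_to_entailments:
--                 text_to_entailments[text1] = set()
--             text_to_entailments[text1].add(text2)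
--     return text_to_entailments, text_to_entailers
-- ===== SOURCE B (Python) =====
-- def pairs_dict_to_entailment_dicts(pairs_dict):
--     # Group-by re-implementation: collect the entailment edges once, then build
--     # each direction as a comprehension over the first-occurrence keys, with a
--     # per-key scan of the edge list (instead of growing both dicts incrementally).
--     edges = [(t1, t2) for (t1, t2), label in pairs_dict.items()
--              if label == "entailment" and t1 != t2]
--     text_to_entailments = {a: {y for x, y in edges if x == a}
--                            for a in dict.fromkeys(x for x, _ in edges)}
--     text_to_entailers = {b: {x for x, y in edges if y == b}
--                          for b in dict.fromkeys(y for _, y in edges)}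
--     return text_to_entailments, text_to_entailers
-- ===== Notes on version B (the rewrite author's own statement) =====
-- stated objective: alternative
-- what changed: B replaces A's single incremental loop that grows both dict-of-set maps entry by entry with a staged group-by: it extracts the entailment edge list once, then builds each map as a comprehension over the first-occurrence keys with a per-key scan of the edges; Pre_ excludes association lists with duplicate (text1,text2) keys, which do not represent a value of the parameter's dict type.
import Mathlib
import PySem

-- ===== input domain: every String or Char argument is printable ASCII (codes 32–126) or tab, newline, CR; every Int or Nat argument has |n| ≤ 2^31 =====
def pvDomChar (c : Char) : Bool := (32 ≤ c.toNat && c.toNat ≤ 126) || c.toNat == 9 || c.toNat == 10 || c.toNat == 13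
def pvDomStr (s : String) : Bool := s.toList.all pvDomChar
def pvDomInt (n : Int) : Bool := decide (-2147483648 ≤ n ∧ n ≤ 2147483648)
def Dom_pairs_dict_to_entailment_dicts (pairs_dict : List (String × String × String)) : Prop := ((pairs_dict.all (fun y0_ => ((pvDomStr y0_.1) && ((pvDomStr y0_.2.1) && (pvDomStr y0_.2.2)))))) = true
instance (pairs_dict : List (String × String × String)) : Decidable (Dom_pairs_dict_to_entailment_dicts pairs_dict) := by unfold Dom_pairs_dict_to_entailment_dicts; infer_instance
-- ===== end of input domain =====

-- B builds the entailment edge list once and then builds each direction as a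
-- group-by: a map over the first-occurrence keys with a per-key scan of the
-- edges, instead of A's single loop growing both dicts entry by entry;
-- objective: alternative decomposition.

-- ===== PORT A =====
-- port of the Python lookup `pairs_dict[pair]` on the association list (first match)
def pvLabel : List (String × String × String) → String → String → Option String
  | [], _, _ => none
  | q :: rest, t1, t2 =>
      if q.1 == t1 && q.2.1 == t2 then some q.2.2 else pvLabel rest t1 t2

def pairs_dict_to_entailment_dicts (pairs_dict : List (String × String × String)) : (List (String × List String)) × (List (String × List String)) :=
  -- state: (text_to_entailers, text_to_entailments), exactly A's two dicts of sets
  let st := pairs_dict.foldl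
    (fun (st : PySem.Dict String (PySem.Set String) × PySem.Dict String (PySem.Set String)) p =>
      if (pvLabel pairs_dict p.1 p.2.1 == some "entailment") && (p.1 != p.2.1) then
        let ers := if st.1.contains p.2.1 then st.1 else st.1.insert p.2.1 PySem.Set.empty
        let ers := ers.modify p.2.1 PySem.Set.empty (fun s => s.add p.1)
        let ents := if st.2.contains p.1 then st.2 else st.2.insert p.1 PySem.Set.empty
        let ents := ents.modify p.1 PySem.Set.empty (fun s => s.add p.2.1)
        (ers, ents)
      else st)
    (PySem.Dict.empty, PySem.Dict.empty)
  (st.2.items, st.1.items)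

-- ===== PORT B =====
def pairs_dict_to_entailment_dicts_alt (pairs_dict : List (String × String × String)) : (List (String × List String)) × (List (String × List String)) :=
  let edges := pairs_dict.filterMap
    (fun p => if (p.2.2 == "entailment") && (p.1 != p.2.1) then some (p.1, p.2.1) else none)
  let ents := (PySem.List.dedup (edges.map (fun e => e.1))).map
    (fun a => (a, PySem.Set.ofList ((edges.filter (fun e => e.1 == a)).map (fun e => e.2))))
  let ers := (PySem.List.dedup (edges.map (fun e => e.2))).map
    (fun b => (b, PySem.Set.ofList ((edges.filter (fun e => e.2 == b)).map (fun e => e.1))))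
  (ents, ers)

-- ===== PRECONDITION & SPEC =====
-- Pre_ excludes lists with duplicate (text1, text2) keys: such a list does not represent
-- a value of A's parameter type dict[tuple[str,str], str], where keys are unique.
def Pre_pairs_dict_to_entailment_dicts (pairs_dict : List (String × String × String)) : Prop :=
  (pairs_dict.map (fun p => (p.1, p.2.1))).Nodup
instance (pairs_dict : List (String × String × String)) : Decidable (Pre_pairs_dict_to_entailment_dicts pairs_dict) := by unfold Pre_pairs_dict_to_entailment_dicts; infer_instance

def pvWitness_pairs_dict_to_entailment_dicts : (List (String × String × String)) :=
  [("a", "b", "entailment"), ("b", "c", "neutral"), ("c", "b", "entailment")]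

def Spec_pairs_dict_to_entailment_dicts (pairs_dict : List (String × String × String)) (out : (List (String × List String)) × (List (String × List String))) : Prop := out = pairs_dict_to_entailment_dicts_alt pairs_dict
instance (pairs_dict : List (String × String × String)) (out : (List (String × List String)) × (List (String × List String))) : Decidable (Spec_pairs_dict_to_entailment_dicts pairs_dict out) := by unfold Spec_pairs_dict_to_entailment_dicts; infer_instance

-- ===== CLAIM (what is proved, stated in full; the proofs are below) =====
def Claim_equal_pairs_dict_to_entailment_dicts : Prop := ∀ (pairs_dict : List (String × String × String)), Dom_pairs_dict_to_entailment_dicts pairs_dict → Pre_pairs_dict_to_entailment_dicts pairs_dict → Spec_pairs_dict_to_entailment_dicts pairs_dict (pairs_dict_to_entailment_dicts pairs_dict)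

-- ===== LEMMAS AND PROOFS =====

-- the grouping step of A collapses to a plain `modify`
theorem pv_insert_then_modify (d : PySem.Dict String (PySem.Set String)) (k : String) (f : PySem.Set String → PySem.Set String) :
    (if d.contains k then d else d.insert k PySem.Set.empty).modify k PySem.Set.empty f
      = d.modify k PySem.Set.empty f := by
  by_cases h : d.contains k
  · simp [h]
  · have h' : d.contains k = false := by simpa using h
    simp only [h, Bool.false_eq_true, if_false]
    simp only [PySem.Dict.modify, PySem.Dict.getD_insert_self, PySem.Dict.insert_insert_self]
    rw [PySem.Dict.getD_of_not_contains d _ h']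

-- first-match lookup of a member's own key, under unique keys
theorem pvLabel_mem (pd : List (String × String × String))
    (hnd : (pd.map (fun p => (p.1, p.2.1))).Nodup) {p : String × String × String} (hp : p ∈ pd) :
    pvLabel pd p.1 p.2.1 = some p.2.2 := by
  induction pd with
  | nil => cases hp
  | cons q rest ih =>
    simp only [List.map_cons, List.nodup_cons] at hnd
    rcases List.mem_cons.mp hp with rfl | hp'
    · simp [pvLabel]
    · by_cases hq : (q.1 == p.1 && q.2.1 == p.2.1) = true
      · exfalso
        simp only [Bool.and_eq_true, beq_iff_eq] at hq
        exact hnd.1 (by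
          refine List.mem_map.mpr ⟨p, hp', ?_⟩
          simp [hq.1, hq.2])
      · simp only [pvLabel, hq, if_neg, Bool.false_eq_true, not_false_iff]
        exact ih hnd.2 hp'

-- a guarded fold over the list equals the fold over the filterMapped edge list
theorem pv_foldl_filterMap {σ : Type} (pd : List (String × String × String))
    (c : String × String × String → Bool) (h : σ → String × String → σ) (st : σ) :
    pd.foldl (fun st p => if c p then h st (p.1, p.2.1) else st) st
      = (pd.filterMap (fun p => if c p then some (p.1, p.2.1) else none)).foldl h st := by
  induction pd generalizing st with
  | nil => rfl
  | cons q rest ih =>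
    by_cases hq : c q
    · simp [hq, ih]
    · simp [hq, ih]

-- a fold of a componentwise step splits into two folds
theorem pv_foldl_prod {σ τ α : Type} (l : List α) (f : σ → α → σ) (g : τ → α → τ) (a : σ) (b : τ) :
    l.foldl (fun st x => (f st.1 x, g st.2 x)) (a, b) = (l.foldl f a, l.foldl g b) := by
  induction l generalizing a b with
  | nil => rfl
  | cons x xs ih => simpa using ih (f a x) (g b x)

-- the grouping fold, generic in how a pair is split into key and value
def pvGroup (key val : String × String → String) (l : List (String × String)) : PySem.Dict String (PySem.Set String) :=
  l.foldl (fun d e => d.modify (key e) PySem.Set.empty (fun s => s.add (val e))) PySem.Dict.empty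

theorem pv_ofList_append_singleton (xs : List String) (x : String) :
    PySem.Set.ofList (xs ++ [x]) = (PySem.Set.ofList xs).add x := by
  simp [PySem.Set.ofList_eq_foldl]

-- the value the grouping fold stores at a key: the set of values of the key's edges
theorem pvGroup_getD (key val : String × String → String) (l : List (String × String))
    (d : PySem.Dict String (PySem.Set String)) (k : String) :
    (l.foldl (fun d e => d.modify (key e) PySem.Set.empty (fun s => s.add (val e))) d).getD k PySem.Set.empty
      = PySem.Set.update (d.getD k PySem.Set.empty) ((l.filter (fun e => key e == k)).map val) := by
  induction l generalizing d with
  | nil => rfl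
  | cons e rest ih =>
    by_cases he : key e = k
    · subst he
      simp only [List.foldl_cons, List.filter_cons, beq_self_eq_true, if_pos, List.map_cons]
      rw [ih, PySem.Dict.getD_modify_self]
      rfl
    · have hne : (key e == k) = false := by simp [he]
      simp only [List.foldl_cons, List.filter_cons, hne, Bool.false_eq_true, if_false]
      rw [ih, PySem.Dict.getD_modify_of_ne]
      exact fun h => he h.symm

-- the items of the grouping fold: first-occurrence keys paired with their value sets
theorem pvGroup_items (key val : String × String → String) (l : List (String × String)) :
    (pvGroup key val l).items
      = (PySem.Set.ofList (l.map key)).map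
          (fun k => (k, PySem.Set.ofList ((l.filter (fun e => key e == k)).map val))) := by
  induction l using List.reverseRecOn with
  | nil => rfl
  | append_singleton es e ih =>
    have hkeys : (pvGroup key val es).keys = PySem.Set.ofList (es.map key) := by
      unfold pvGroup
      rw [PySem.Dict.keys_foldl_modify_key]
      simp [PySem.Set.ofList_eq_foldl, PySem.Set.update]
    have hcont : (pvGroup key val es).contains (key e) = decide (key e ∈ es.map key) := by
      rw [PySem.Dict.contains_eq_decide_mem_keys, hkeys]
      simp [PySem.Set.mem_ofList]
    have hfold : pvGroup key val (es ++ [e])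
        = (pvGroup key val es).modify (key e) PySem.Set.empty (fun s => s.add (val e)) := by
      unfold pvGroup; rw [List.foldl_append]; rfl
    have hmod : pvGroup key val (es ++ [e])
        = (pvGroup key val es).insert (key e)
            (((pvGroup key val es).getD (key e) PySem.Set.empty).add (val e)) := hfold
    have hgetD : (pvGroup key val es).getD (key e) PySem.Set.empty
        = PySem.Set.ofList ((es.filter (fun e' => key e' == key e)).map val) := by
      unfold pvGroup
      rw [pvGroup_getD]
      simp [PySem.Dict.getD_empty, PySem.Set.update, PySem.Set.ofList_eq_foldl]
    by_cases hm : key e ∈ es.map key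
    · -- existing key: the insert replaces the entry in place; the key list is unchanged
      have hc : (pvGroup key val es).contains (key e) = true := by simp [hcont, hm]
      rw [hmod, PySem.Dict.items_insert_of_contains _ _ hc, ih]
      have hkeys2 : PySem.Set.ofList ((es ++ [e]).map key) = PySem.Set.ofList (es.map key) := by
        rw [List.map_append, List.map_cons, List.map_nil, pv_ofList_append_singleton,
          PySem.Set.add]
        have : PySem.Set.contains (PySem.Set.ofList (es.map key)) (key e) = true := by
          rw [PySem.Set.contains_eq_decide]
          exact decide_eq_true ((PySem.Set.mem_ofList _ _).mpr hm)
        simp only [this]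
        simp
      rw [hkeys2, List.map_map]
      apply List.map_congr_left
      intro k hk
      by_cases hke : k = key e
      · subst hke
        simp only [Function.comp_apply, beq_self_eq_true, if_pos]
        rw [hgetD, List.filter_append, List.map_append]
        simp only [List.filter_cons, List.filter_nil, beq_self_eq_true, if_pos, List.map_cons,
          List.map_nil]
        rw [pv_ofList_append_singleton]
      · have : (k == key e) = false := by simp [hke]
        simp only [Function.comp_apply, this, Bool.false_eq_true, if_false]
        rw [List.filter_append]
        have hek : key e ≠ k := fun h => hke h.symm
        have : List.filter (fun e' => key e' == k) [e] = [] := by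
          simp [hek]
        simp [this]
    · -- fresh key: the insert appends a new singleton-set entry
      have hc : (pvGroup key val es).contains (key e) = false := by simp [hcont, hm]
      rw [hmod, PySem.Dict.items_insert_of_not_contains _ _ hc, ih]
      rw [PySem.Dict.getD_of_not_contains _ _ hc]
      have hkeys2 : PySem.Set.ofList ((es ++ [e]).map key)
          = PySem.Set.ofList (es.map key) ++ [key e] := by
        rw [List.map_append, List.map_cons, List.map_nil, pv_ofList_append_singleton,
          PySem.Set.add]
        have : PySem.Set.contains (PySem.Set.ofList (es.map key)) (key e) = false := by
          rw [PySem.Set.contains_eq_decide]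
          exact decide_eq_false (fun h => hm ((PySem.Set.mem_ofList _ _).mp h))
        simp only [this]
        simp
      rw [hkeys2, List.map_append]
      congr 1
      · apply List.map_congr_left
        intro k hk
        have hkmem : k ∈ es.map key := by
          have := hk
          rw [PySem.Set.mem_ofList] at this
          exact this
        have hke : key e ≠ k := fun h => hm (h ▸ hkmem)
        rw [List.filter_append]
        have : List.filter (fun e' => key e' == k) [e] = [] := by
          simp [hke]
        simp [this]
      · have hfe : es.filter (fun e' => key e' == key e) = [] := by
          rw [List.filter_eq_nil_iff]
          intro e' he'
          simp only [beq_iff_eq]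
          intro h
          exact hm (h ▸ List.mem_map_of_mem he')
        simp [List.filter_append, List.filter_cons, hfe, PySem.Set.ofList, PySem.Set.add,
          PySem.Set.empty]

-- ===== VERDICT (by name: the statement is the Claim_ definition above) =====
theorem pairs_dict_to_entailment_dicts_spec : Claim_equal_pairs_dict_to_entailment_dicts := by
  intro pd _ hpre
  unfold Spec_pairs_dict_to_entailment_dicts
  simp only [pairs_dict_to_entailment_dicts, pairs_dict_to_entailment_dicts_alt]
  set c : String × String × String → Bool := fun p => (p.2.2 == "entailment") && (p.1 != p.2.1) with hc
  have hcond : ∀ p ∈ pd, ((pvLabel pd p.1 p.2.1 == some "entailment") && (p.1 != p.2.1)) = c p := by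
    intro p hp
    rw [pvLabel_mem pd hpre hp]
    simp [hc]
  -- rewrite A's fold: the lookup condition becomes the local condition, the two
  -- insert-then-modify updates become plain modifies
  have hstep : pd.foldl
      (fun (st : PySem.Dict String (PySem.Set String) × PySem.Dict String (PySem.Set String)) p =>
        if (pvLabel pd p.1 p.2.1 == some "entailment") && (p.1 != p.2.1) then
          ((if st.1.contains p.2.1 then st.1 else st.1.insert p.2.1 PySem.Set.empty).modify p.2.1 PySem.Set.empty (fun s => s.add p.1),
           (if st.2.contains p.1 then st.2 else st.2.insert p.1 PySem.Set.empty).modify p.1 PySem.Set.empty (fun s => s.add p.2.1))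
        else st)
      (PySem.Dict.empty, PySem.Dict.empty)
      = pd.foldl
      (fun (st : PySem.Dict String (PySem.Set String) × PySem.Dict String (PySem.Set String)) p =>
        if c p then
          (st.1.modify p.2.1 PySem.Set.empty (fun s => s.add p.1),
           st.2.modify p.1 PySem.Set.empty (fun s => s.add p.2.1))
        else st)
      (PySem.Dict.empty, PySem.Dict.empty) := by
    apply PySem.List.foldl_congr_mem
    intro st p hp
    rw [hcond p hp, pv_insert_then_modify, pv_insert_then_modify]
  rw [hstep]
  have hsplit := pv_foldl_prod (σ := PySem.Dict String (PySem.Set String)) (τ := PySem.Dict String (PySem.Set String))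
    (pd.filterMap (fun p => if c p then some (p.1, p.2.1) else none))
    (fun d (e : String × String) => d.modify e.2 PySem.Set.empty (fun s => s.add e.1))
    (fun d (e : String × String) => d.modify e.1 PySem.Set.empty (fun s => s.add e.2))
    PySem.Dict.empty PySem.Dict.empty
  rw [pv_foldl_filterMap pd c
    (fun (st : PySem.Dict String (PySem.Set String) × PySem.Dict String (PySem.Set String)) (e : String × String) =>
      (st.1.modify e.2 PySem.Set.empty (fun s => s.add e.1),
       st.2.modify e.1 PySem.Set.empty (fun s => s.add e.2)))]
  rw [hsplit]
  have h1 := pvGroup_items (fun e => e.1) (fun e => e.2)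
    (pd.filterMap (fun p => if c p then some (p.1, p.2.1) else none))
  have h2 := pvGroup_items (fun e => e.2) (fun e => e.1)
    (pd.filterMap (fun p => if c p then some (p.1, p.2.1) else none))
  unfold pvGroup at h1 h2
  rw [h1, h2, PySem.List.dedup_eq_ofList, PySem.List.dedup_eq_ofList]
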